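-- pv_equiv track=rewrite | github.com/A-stick-bug/CCC-Solutions | 2011/CCC '11 S5 - Switch.py | off
-- ===== SOURCE A (Python) =====
-- def off(arr):
--     """turn off 4+ in a row lights"""
--     arr.append(0)  # extra zero to ensure trailing ones are handled
--     ones = 0
--     for i, val in enumerate(arr):
--         if val:
--             ones += 1
--         else:
--             if ones >= 4:  # more than 4 in a row, turn them off
--                 for j in range(i - ones, i):
--                     arr[j] = 0
--             ones = 0
--
--     # optimization: remove leading and trailing zeros
--     while len(arr) > 4 and not arr[-1]:
--         arr.pop()
--     arr = arr[::-1]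
--     while len(arr) > 4 and not arr[-1]:
--         arr.pop()
--     return arr[::-1]
-- ===== SOURCE B (Python) =====
-- def off(arr):
--     """turn off 4+ in a row lights (pure: leaves the caller's list untouched)"""
--     cells = arr + [0]          # a zero after the last cell flushes the final run
--     out, run = [], []
--     for v in cells:
--         if v:
--             run.append(v)
--         else:
--             out += [0] * len(run) if len(run) >= 4 else run
--             out.append(0)
--             run = []
--     # trim zeros at either end, keeping at least 4 cells
--     while len(out) > 4 and not out[-1]:
--         out.pop()
--     while len(out) > 4 and not out[0]:
--         del out[0]
--     return out
-- ===== Notes on version B (the rewrite author's own statement) =====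
-- stated objective: alternative
-- what changed: B replaces A's in-place index surgery (enumerate over the mutated list with an inner range loop writing zeros back, then reverse/pop/reverse trimming) by a pure run-grouping pass that rebuilds the zeroed list from buffered runs and trims both ends directly (tail pops, head deletes); B does not mutate the caller's list, the claim is about the return value.
import Mathlib
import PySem

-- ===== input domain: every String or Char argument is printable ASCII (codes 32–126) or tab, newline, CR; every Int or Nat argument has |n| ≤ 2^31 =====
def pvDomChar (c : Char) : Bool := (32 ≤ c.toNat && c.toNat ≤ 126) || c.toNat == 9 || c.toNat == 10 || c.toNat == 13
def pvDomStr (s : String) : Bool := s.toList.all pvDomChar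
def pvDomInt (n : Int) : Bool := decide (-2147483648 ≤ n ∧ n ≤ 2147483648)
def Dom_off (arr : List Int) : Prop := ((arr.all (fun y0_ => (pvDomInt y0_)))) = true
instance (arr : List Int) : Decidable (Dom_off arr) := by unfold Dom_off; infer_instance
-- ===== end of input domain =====

-- B rebuilds the zeroed array by grouping runs of nonzeros and trims zeros from both ends
-- directly, instead of A's in-place index writes and reverse/pop/reverse trimming.
-- A mutates the caller's list, B does not: the equivalence proved here is about the RETURN value.


-- ===== PORT A =====
-- loop body of A's 'for i, val in enumerate(arr)': state = (current list, ones)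
def offStepA (st : List Int × Int) (i : Nat) : List Int × Int :=
  let a := st.1
  let ones := st.2
  let val := a.getD i 0          -- enumerate yields the element of the live (mutated) list
  if val ≠ 0 then (a, ones + 1)
  else if ones ≥ 4 then
    -- 'for j in range(i - ones, i): arr[j] = 0'; j ≥ 0 here (ones counts elements before i)
    ((PySem.List.pyRange ((i : Int) - ones) (i : Int) 1).foldl (fun a j => a.set j.toNat 0) a, 0)
  else (a, 0)

-- 'while len(arr) > 4 and not arr[-1]: arr.pop()'
def offTrim (a : List Int) : List Int :=
  if _h : 4 < a.length ∧ PySem.List.pyGet? a (-1) = some 0 then offTrim a.dropLast else a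
termination_by a.length
decreasing_by
  simp only [List.length_dropLast]
  omega

def off (arr : List Int) : List Int :=
  let a0 := arr ++ [0]                                    -- arr.append(0)
  let st := (List.range a0.length).foldl offStepA (a0, 0) -- the enumerate loop
  let a1 := offTrim st.1                                  -- trailing-zero pops
  (offTrim a1.reverse).reverse                            -- arr[::-1]; pops; arr[::-1]

-- ===== PORT B =====
-- loop body of B's run-grouping pass: state = (out, run)
def offStepB (st : List Int × List Int) (v : Int) : List Int × List Int :=
  if v ≠ 0 then (st.1, st.2 ++ [v])
  else (st.1 ++ (if st.2.length ≥ 4 then List.replicate st.2.length 0 else st.2) ++ [0], [])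

-- 'while len(out) > 4 and not out[-1]: out.pop()'
def offTrimTail (a : List Int) : List Int :=
  if _h : 4 < a.length ∧ PySem.List.pyGet? a (-1) = some 0 then offTrimTail a.dropLast else a
termination_by a.length
decreasing_by
  simp only [List.length_dropLast]
  omega

-- 'while len(out) > 4 and not out[0]: del out[0]'
def offTrimHead (a : List Int) : List Int :=
  if _h : 4 < a.length ∧ PySem.List.pyGet? a 0 = some 0 then offTrimHead a.tail else a
termination_by a.length
decreasing_by
  simp only [List.length_tail]
  omega

def off_alt (arr : List Int) : List Int :=
  let s := (arr ++ [0]).foldl offStepB ([], [])   -- cells = arr + [0]; the grouping loop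
  offTrimHead (offTrimTail s.1)

-- ===== PRECONDITION & SPEC =====
def Spec_off (arr : List Int) (out : List Int) : Prop := out = off_alt arr
instance (arr : List Int) (out : List Int) : Decidable (Spec_off arr out) := by unfold Spec_off; infer_instance

-- ===== CLAIM (what is proved, stated in full; the proofs are below) =====
def Claim_equal_off : Prop := ∀ (arr : List Int), Dom_off arr → Spec_off arr (off arr)

-- ===== LEMMAS AND PROOFS =====

-- reading the element at the border of the processed prefix
lemma getD_mid (w t : List Int) (v : Int) : (w ++ v :: t).getD w.length 0 = v := by
  simp [List.getD]

-- A's inner zeroing loop turns exactly the run slot into zeros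
lemma zero_fill (run : List Int) : ∀ (z rest : List Int),
    (PySem.List.pyRange (z.length : Int) ((z.length : Int) + run.length) 1).foldl
        (fun a j => a.set j.toNat 0) (z ++ run ++ rest)
      = z ++ List.replicate run.length 0 ++ rest := by
  induction run with
  | nil => intro z rest; simp [PySem.List.pyRange_one_eq_nil]
  | cons v run ih =>
    intro z rest
    rw [PySem.List.pyRange_one_cons (by simp only [List.length_cons]; push_cast; omega)]
    simp only [List.foldl_cons, Int.toNat_natCast]
    have hset : (z ++ (v :: run) ++ rest).set z.length 0 = (z ++ [0]) ++ run ++ rest := by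
      rw [List.append_assoc, List.set_append_right z.length 0 (Nat.le_refl _)]
      simp
    rw [hset]
    have h1 : ((z.length : Int) + 1) = (((z ++ [0]).length : Int)) := by simp
    have h2 : ((z.length : Int) + (((v :: run).length : Nat) : Int))
        = (((z ++ [0]).length : Int) + (run.length : Int)) := by
      simp only [List.length_cons, List.length_append, List.length_nil]; push_cast; omega
    rw [h1, h2, ih (z ++ [0]) rest]
    simp [List.replicate_succ]

-- main loop invariant: A's enumerate loop on z ++ run ++ r, with ones = |run|,
-- computes B's grouping fold
lemma loopA (r : List Int) : ∀ (z run : List Int),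
    (List.range' (z.length + run.length) r.length 1).foldl offStepA
        (z ++ run ++ r, (run.length : Int))
      = ((r.foldl offStepB (z, run)).1 ++ (r.foldl offStepB (z, run)).2,
         (((r.foldl offStepB (z, run)).2.length : Int))) := by
  induction r with
  | nil => intro z run; simp
  | cons v r ih =>
    intro z run
    rw [List.length_cons, List.range'_succ, List.foldl_cons]
    have hval : (z ++ run ++ v :: r).getD (z.length + run.length) 0 = v := by
      rw [← List.length_append]
      exact getD_mid (z ++ run) r v
    by_cases hv : v = 0
    · subst hv
      rw [List.foldl_cons]
      by_cases h4 : (4 : Int) ≤ (run.length : Int)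
      · have hB : offStepB (z, run) 0 = (z ++ List.replicate run.length 0 ++ [0], []) := by
          simp only [offStepB]
          rw [if_neg (by decide), if_pos (by exact_mod_cast h4)]
        have hstep : offStepA (z ++ run ++ 0 :: r, (run.length : Int)) (z.length + run.length)
            = (z ++ List.replicate run.length 0 ++ [0] ++ r, 0) := by
          simp only [offStepA, hval]
          rw [if_neg (by decide), if_pos (show (run.length : Int) ≥ 4 from h4)]
          have e1 : ((z.length + run.length : Nat) : Int) - (run.length : Int) = (z.length : Int) := by
            push_cast; omega
          have e2 : ((z.length + run.length : Nat) : Int) = (z.length : Int) + (run.length : Int) := by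
            push_cast; omega
          rw [e1, e2, show z ++ run ++ 0 :: r = z ++ run ++ (0 :: r) from rfl, zero_fill run z (0 :: r)]
          simp
        rw [hstep, hB]
        have h := ih (z ++ List.replicate run.length 0 ++ [0]) []
        simp only [List.append_nil, List.length_nil, Nat.cast_zero, Nat.add_zero] at h
        rw [show z.length + run.length + 1
            = (z ++ List.replicate run.length 0 ++ [0]).length by simp; omega]
        exact h
      · have hB : offStepB (z, run) 0 = (z ++ run ++ [0], []) := by
          simp only [offStepB]
          rw [if_neg (by decide), if_neg (by exact_mod_cast h4)]
        have hstep : offStepA (z ++ run ++ 0 :: r, (run.length : Int)) (z.length + run.length)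
            = (z ++ run ++ [0] ++ r, 0) := by
          simp only [offStepA, hval]
          rw [if_neg (by decide), if_neg (show ¬ (run.length : Int) ≥ 4 from h4)]
          simp
        rw [hstep, hB]
        have h := ih (z ++ run ++ [0]) []
        simp only [List.append_nil, List.length_nil, Nat.cast_zero, Nat.add_zero] at h
        rw [show z.length + run.length + 1 = (z ++ run ++ [0]).length by simp; omega]
        exact h
    · rw [List.foldl_cons]
      have hB : offStepB (z, run) v = (z, run ++ [v]) := by
        simp only [offStepB]
        rw [if_pos hv]
      have hstep : offStepA (z ++ run ++ v :: r, (run.length : Int)) (z.length + run.length)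
          = (z ++ (run ++ [v]) ++ r, ((run ++ [v]).length : Int)) := by
        simp only [offStepA, hval]
        rw [if_pos hv]
        simp only [Prod.mk.injEq]
        exact ⟨by simp, by simp⟩
      rw [hstep, hB]
      have h := ih z (run ++ [v])
      rw [show z.length + run.length + 1 = z.length + (run ++ [v]).length by simp; omega]
      exact h

-- the two tail-trim loops are the same while loop
lemma trimTail_eq (a : List Int) : offTrimTail a = offTrim a := by
  induction a using offTrim.induct with
  | case1 a h ih => rw [offTrimTail, offTrim, dif_pos h, dif_pos h, ih]
  | case2 a h => rw [offTrimTail, offTrim, dif_neg h, dif_neg h]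

-- A's leading trim (reverse, tail pops, reverse) is B's head-delete loop
lemma dropLast_rev (t : List Int) : t.reverse.dropLast = t.tail.reverse := by
  cases t with
  | nil => simp
  | cons h t => simp

lemma trim_head_rev (t : List Int) : (offTrim t.reverse).reverse = offTrimHead t := by
  induction t using offTrimHead.induct with
  | case1 t h ih =>
    obtain ⟨hlen, hget⟩ := h
    have hhead : t.head? = some 0 := by
      rw [PySem.List.pyGet?_zero] at hget
      rw [List.head?_eq_getElem?]
      exact hget
    have hg : offTrim t.reverse = offTrim t.tail.reverse := by
      rw [offTrim, dif_pos ⟨by simpa using hlen,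
        by rw [PySem.List.pyGet?_neg_one, List.getLast?_reverse]; exact hhead⟩]
      rw [dropLast_rev]
    rw [offTrimHead, dif_pos ⟨hlen, hget⟩, ← ih, hg]
  | case2 t h =>
    rw [offTrimHead, dif_neg h, offTrim, dif_neg (by
      rintro ⟨hlen, hget⟩
      rw [PySem.List.pyGet?_neg_one, List.getLast?_reverse, List.head?_eq_getElem?] at hget
      exact h ⟨by simpa using hlen, by rw [PySem.List.pyGet?_zero]; exact hget⟩)]
    exact List.reverse_reverse t

-- the grouping fold flushed by the trailing sentinel 0 has an empty run
lemma foldl_stepB_sentinel (l : List Int) :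
    (l ++ [0]).foldl offStepB ([], []) =
      (((l ++ [0]).foldl offStepB ([], [])).1, []) := by
  rw [List.foldl_append]
  simp only [List.foldl_cons, List.foldl_nil]
  rw [offStepB]
  simp

-- ===== VERDICT (by name: the statement is the Claim_ definition above) =====
theorem off_spec : Claim_equal_off := by
  intro arr _
  unfold Spec_off off off_alt
  simp only []
  -- identify A's loop result with B's grouping fold
  have hloop := loopA (arr ++ [0]) [] []
  simp only [List.length_nil, List.nil_append, Nat.add_zero, Nat.cast_zero] at hloop
  rw [List.range_eq_range'] at *
  set s := (arr ++ [0]).foldl offStepB ([], []) with hs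
  have hsent : s = (s.1, []) := foldl_stepB_sentinel arr
  rw [hloop, show s.2 = [] from congrArg Prod.snd hsent, List.append_nil]
  rw [trimTail_eq, trim_head_rev]
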